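-- pv_equiv track=rewrite | github.com/blackboxprogramming/BlackRoad-Operating-System | agents/categories/engineering/authorization_generator.py | _get_role_permissions
-- ===== SOURCE A (Python) =====
-- from typing import Any, Dict, List
--
-- def _get_role_permissions(role: str, resources: List[str]) -> List[str]:
--     """Get permissions for a role."""
--     if role == 'admin':
--         # Admin gets all permissions
--         permissions = []
--         for resource in resources:
--             for action in ['create', 'read', 'update', 'delete']:
--                 permissions.append(f'{resource}:{action}')
--         return permissions
--     elif role == 'manager':
--         # Manager gets read, update, create
--         permissions = []
--         for resource in resources:
--             for action in ['create', 'read', 'update']: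
--                 permissions.append(f'{resource}:{action}')
--         return permissions
--     elif role == 'user':
--         # User gets read only
--         return [f'{resource}:read' for resource in resources]
--     else:
--         # Guest gets minimal permissions
--         return []
-- ===== SOURCE B (Python) =====
-- ACTIONS = ('create', 'read', 'update', 'delete')
-- ALLOWED = {
--     'admin': frozenset(ACTIONS),
--     'manager': frozenset(('create', 'read', 'update')),
--     'user': frozenset(('read',)),
-- }
--
-- def _get_role_permissions(role, resources):
--     """Get permissions for a role: build the full resource x action grid, then prune."""
--     grid = [(r, a) for r in resources for a in ACTIONS]
--     allowed = ALLOWED.get(role, frozenset())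
--     return [f'{r}:{a}' for (r, a) in grid if a in allowed]
-- ===== Notes on version B (the rewrite author's own statement) =====
-- stated objective: alternative
-- what changed: Instead of branching per role with per-role loops that build exactly the right items, B first materialises the universal resource x action cross product, then a second pass prunes it against the role's allowed-action set (empty for unknown roles) while formatting.
import Mathlib
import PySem

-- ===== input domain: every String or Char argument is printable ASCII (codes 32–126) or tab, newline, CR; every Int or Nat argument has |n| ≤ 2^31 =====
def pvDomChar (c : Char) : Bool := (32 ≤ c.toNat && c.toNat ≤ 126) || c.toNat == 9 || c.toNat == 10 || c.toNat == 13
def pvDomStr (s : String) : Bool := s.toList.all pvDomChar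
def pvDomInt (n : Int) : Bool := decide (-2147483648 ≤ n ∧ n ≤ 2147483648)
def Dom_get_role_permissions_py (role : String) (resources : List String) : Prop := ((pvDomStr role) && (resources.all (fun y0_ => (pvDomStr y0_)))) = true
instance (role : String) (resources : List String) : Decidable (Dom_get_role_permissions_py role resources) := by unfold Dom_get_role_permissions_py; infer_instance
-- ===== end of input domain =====

-- B replaces A's per-role branches and loops by one universal resource×action grid, pruned by the role's allowed-action set (alternative decomposition).
-- ===== PORT A =====
-- Port of A: per-role branches, each an explicit append-loop over resources and the role's actions.
def get_role_permissions_py (role : String) (resources : List String) : List String :=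
  if role == "admin" then
    resources.foldl (fun permissions resource =>
      (["create", "read", "update", "delete"] : List String).foldl
        (fun p action => p ++ [resource ++ ":" ++ action]) permissions) []
  else if role == "manager" then
    resources.foldl (fun permissions resource =>
      (["create", "read", "update"] : List String).foldl
        (fun p action => p ++ [resource ++ ":" ++ action]) permissions) []
  else if role == "user" then
    resources.map (fun resource => resource ++ ":read")
  else
    []

-- ===== PORT B =====
-- Port of B: build the full (resource, action) grid, then prune by the role's allowed-action set while formatting.
def pvActions : List String := ["create", "read", "update", "delete"]

def pvAllowed : PySem.Dict String (PySem.Set String) :=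
  PySem.Dict.ofList
  [("admin", PySem.Set.ofList ["create", "read", "update", "delete"]),
   ("manager", PySem.Set.ofList ["create", "read", "update"]),
   ("user", PySem.Set.ofList ["read"])]

def get_role_permissions_py_alt (role : String) (resources : List String) : List String :=
  let grid := resources.flatMap (fun r => pvActions.map (fun a => (r, a)))
  let allowed := PySem.Dict.getD pvAllowed role PySem.Set.empty
  grid.filterMap (fun p =>
    if PySem.Set.contains allowed p.2 then some (p.1 ++ ":" ++ p.2) else none)

-- ===== PRECONDITION & SPEC =====
def Spec_get_role_permissions_py (role : String) (resources : List String) (out : List String) : Prop := out = get_role_permissions_py_alt role resources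
instance (role : String) (resources : List String) (out : List String) : Decidable (Spec_get_role_permissions_py role resources out) := by unfold Spec_get_role_permissions_py; infer_instance

-- ===== CLAIM (what is proved, stated in full; the proofs are below) =====
def Claim_equal_get_role_permissions_py : Prop := ∀ (role : String) (resources : List String), Dom_get_role_permissions_py role resources → Spec_get_role_permissions_py role resources (get_role_permissions_py role resources)

-- ===== LEMMAS AND PROOFS =====
theorem pvAllowed_items : pvAllowed.items =
  [("admin", ["create", "read", "update", "delete"]),
   ("manager", ["create", "read", "update"]),
   ("user", ["read"])] := by decide

theorem pvFlattenSing {α β : Type} (f : α → β) (l : List α) :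
    (l.map (fun a => [f a])).flatten = l.map f := by
  induction l <;> simp_all

theorem pvFoldA (acts : List String) (resources : List String) (acc : List String) :
    resources.foldl (fun p r => acts.foldl (fun p a => p ++ [r ++ ":" ++ a]) p) acc
      = acc ++ resources.flatMap (fun r => acts.map (fun a => r ++ ":" ++ a)) := by
  induction resources generalizing acc with
  | nil => simp
  | cons r rs ih => simp [List.flatMap, pvFlattenSing]

-- ===== VERDICT (by name: the statement is the Claim_ definition above) =====
theorem get_role_permissions_py_spec : Claim_equal_get_role_permissions_py := by
  intro role resources hD
  clear hD
  unfold Spec_get_role_permissions_py get_role_permissions_py get_role_permissions_py_alt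
  by_cases h1 : role = "admin"
  · simp only [h1, PySem.Dict.getD, PySem.Dict.get?, pvAllowed_items, pvActions]
    rw [pvFoldA]
    induction resources with
    | nil => simp
    | cons r rs ih => simp_all [PySem.Set.contains, List.flatMap, String.append_assoc]
  · by_cases h2 : role = "manager"
    · simp only [h2, PySem.Dict.getD, PySem.Dict.get?, pvAllowed_items, pvActions,
        beq_iff_eq, if_true]
      rw [pvFoldA]
      induction resources with
      | nil => simp
      | cons r rs ih => simp_all [PySem.Set.contains, List.flatMap, String.append_assoc]
    · by_cases h3 : role = "user"
      · simp only [h3, PySem.Dict.getD, PySem.Dict.get?, pvAllowed_items, pvActions,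
          beq_iff_eq, reduceIte]
        induction resources with
        | nil => simp
        | cons r rs ih => simp_all [PySem.Set.contains, List.flatMap, String.append_assoc]
      · have e1 : ("admin" == role) = false := by simp [Ne.symm h1]
        have e2 : ("manager" == role) = false := by simp [Ne.symm h2]
        have e3 : ("user" == role) = false := by simp [Ne.symm h3]
        simp [h1, h2, h3, PySem.Dict.getD, PySem.Dict.get?, pvAllowed_items, e1, e2, e3,
          PySem.Set.contains, PySem.Set.empty]
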